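-- pv_equiv track=rewrite | github.com/karasevm/adventofcode2020 | 20/solution.py | check_sides_overlap
-- ===== SOURCE A (Python) =====
-- def check_sides_overlap(grid_a: list[str], grid_b: list[str]) -> bool:
--
--     offsets = [0, 1, 2, 3, 10, 11, 12, 13]
--     for offset in offsets:
--         rotated_grid_b = rotate_grid_clockwise(grid_b, offset)
--         if grid_a[0] == rotated_grid_b[-1]:
--             return True
--         if grid_a[-1] == rotated_grid_b[0]:
--             return True
--         if ''.join([row[0] for row in grid_a]) == ''.join([row[-1] for row in rotated_grid_b]):
--             return True
--         if ''.join([row[-1] for row in grid_a]) == ''.join([row[0] for row in rotated_grid_b]):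
--             return True
--     return False
--
-- def rotate_grid_clockwise(grid: list[str], rotation: int) -> list[str]:
--     if rotation > 3:
--         grid = [line[::-1] for line in grid]
--         rotation = rotation - 10
--     for _ in range(rotation):
--         grid = [''.join(x) for x in zip(*grid[::-1])]
--     return grid
-- ===== SOURCE B (Python) =====
-- def check_sides_overlap(grid_a: list[str], grid_b: list[str]) -> bool:
--     # A clockwise rotation maps the edge quadruple (top, bottom, left, right)
--     # to (left[::-1], right[::-1], bottom, top), so only one real rotation per
--     # mirror side is needed: the shortcut assumes a rectangular grid, and a
--     # ragged list of strings only becomes rectangular after one rotation.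
--     def edges(g):
--         return g[0], g[-1], ''.join(r[0] for r in g), ''.join(r[-1] for r in g)
--
--     def rotate(g):
--         return [''.join(col) for col in zip(*reversed(g))]
--
--     ta, ba, la, ra = edges(grid_a)
--     quads = []
--     for g in (grid_b, [row[::-1] for row in grid_b]):
--         quads.append(edges(g))
--         t, b, l, r = edges(rotate(g))
--         for _ in range(3):
--             quads.append((t, b, l, r))
--             t, b, l, r = l[::-1], r[::-1], b, t
--     return any(ta == b or ba == t or la == r or ra == l for t, b, l, r in quads)
-- ===== Notes on version B (the rewrite author's own statement) =====
-- stated objective: faster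
-- what changed: B performs only one real (zip) rotation per mirror side of grid_b - after which the grid is rectangular - and enumerates the remaining orientations by rotating the edge quadruple (t,b,l,r)->(l[::-1],r[::-1],b,t), where A rebuilds every rotated grid from scratch; Pre_ excludes only empty grids and grids with an empty row, on which A raises IndexError except in a few degenerate early-return cases (B raises there).
-- outside the precondition, e.g. on check_sides_overlap(['a'], ['a', '']): A returns True, B raises IndexError
import Mathlib
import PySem

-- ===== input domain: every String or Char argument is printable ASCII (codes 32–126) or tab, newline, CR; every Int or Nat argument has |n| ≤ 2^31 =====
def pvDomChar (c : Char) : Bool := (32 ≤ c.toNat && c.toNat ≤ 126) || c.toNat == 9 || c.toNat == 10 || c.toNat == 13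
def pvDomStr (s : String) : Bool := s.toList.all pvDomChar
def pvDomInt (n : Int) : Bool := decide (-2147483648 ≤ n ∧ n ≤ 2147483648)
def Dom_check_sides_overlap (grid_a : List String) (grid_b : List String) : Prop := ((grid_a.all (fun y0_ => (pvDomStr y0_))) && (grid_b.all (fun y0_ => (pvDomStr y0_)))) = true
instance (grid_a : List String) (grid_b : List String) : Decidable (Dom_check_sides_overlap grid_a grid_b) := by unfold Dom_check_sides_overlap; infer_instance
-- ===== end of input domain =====

-- B performs ONE real rotation per mirror side of grid_b (after which the grid is rectangular)
-- and enumerates the remaining orientations on edge quadruples (t,b,l,r) -> (l⁻¹,r⁻¹,b,t) only,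
-- where A rebuilds every rotated grid from scratch (objective: faster, a constant-factor change).

-- ===== PORT A =====

-- zip(*rows): truncates to the shortest row, [] when there are no rows (exact Python zip semantics;
-- the getD default is never used since i < m ≤ length of every row)
def pvZipStar (rows : List (List Char)) : List (List Char) :=
  match (rows.map List.length).min? with
  | none => []
  | some m => (List.range m).map (fun i => rows.map (fun r => r.getD i ' '))

def rotate_grid_clockwise (grid : List String) (rotation : Int) : List String :=
  -- if rotation > 3: grid = [line[::-1] for line in grid]; rotation = rotation - 10
  let grid' := if rotation > 3 then grid.map (fun line => String.ofList line.toList.reverse) else grid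
  let rotation' := if rotation > 3 then rotation - 10 else rotation
  -- for _ in range(rotation): grid = [''.join(x) for x in zip(*grid[::-1])]
  (List.range rotation'.toNat).foldl
    (fun g _ => (pvZipStar ((g.map String.toList).reverse)).map String.ofList) grid'

-- the two column comparisons ''.join([row[0] …]) == ''.join([row[-1] …]) are compared as the lists
-- of per-row option characters: under Pre_ every row is nonempty, so the options are all `some` and
-- the comparison is exactly the joined-string comparison; out-of-range (Python IndexError) cases lie
-- outside Pre_.
def check_sides_overlap (grid_a : List String) (grid_b : List String) : Bool :=
  [(0 : Int), 1, 2, 3, 10, 11, 12, 13].any (fun offset =>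
    let rb := rotate_grid_clockwise grid_b offset
    PySem.List.pyGet? grid_a 0 == PySem.List.pyGet? rb (-1) ||
    PySem.List.pyGet? grid_a (-1) == PySem.List.pyGet? rb 0 ||
    grid_a.map (fun row => PySem.Str.pyGet? row 0) == rb.map (fun row => PySem.Str.pyGet? row (-1)) ||
    grid_a.map (fun row => PySem.Str.pyGet? row (-1)) == rb.map (fun row => PySem.Str.pyGet? row 0))

-- ===== PORT B =====

-- ''.join over a list of single-character lookups; none marks the IndexError case (outside Pre_)
def pvJoin? : List (Option Char) → Option (List Char)
  | [] => some []
  | none :: _ => none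
  | some c :: rest => (pvJoin? rest).map (c :: ·)

-- Source B's `rotate`: [''.join(col) for col in zip(*reversed(g))]
def pvRotateGrid (g : List String) : List String :=
  (pvZipStar ((g.map String.toList).reverse)).map String.ofList

-- Source B's `edges`: the quadruple (top, bottom, left, right) as char lists; none marks an
-- IndexError (outside Pre_)
def pvEdgesQ (g : List String) :
    Option (List Char) × Option (List Char) × Option (List Char) × Option (List Char) :=
  ((PySem.List.pyGet? g 0).map String.toList,
   (PySem.List.pyGet? g (-1)).map String.toList,
   pvJoin? (g.map (fun r => PySem.Str.pyGet? r 0)),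
   pvJoin? (g.map (fun r => PySem.Str.pyGet? r (-1))))

-- Source B's quadruple update t, b, l, r = l[::-1], r[::-1], b, t
def pvRotQ (q : Option (List Char) × Option (List Char) × Option (List Char) × Option (List Char)) :
    Option (List Char) × Option (List Char) × Option (List Char) × Option (List Char) :=
  (q.2.2.1.map List.reverse, q.2.2.2.map List.reverse, q.2.1, q.1)

-- transliteration of B: the `for g in (grid_b, flipped)` loop appends edges(g), edges(rotate(g)),
-- and two quadruple rotations of the latter; `any(... for t, b, l, r in quads)` closes it
def check_sides_overlap_alt (grid_a : List String) (grid_b : List String) : Bool :=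
  let qa := pvEdgesQ grid_a
  let quads := [grid_b, grid_b.map (fun row => String.ofList row.toList.reverse)].foldl
    (fun quads g =>
      let quads := quads ++ [pvEdgesQ g]
      let q := pvEdgesQ (pvRotateGrid g)
      ((List.range 3).foldl (fun p _ => (p.1 ++ [p.2], pvRotQ p.2)) (quads, q)).1)
    []
  quads.any (fun q => qa.1 == q.2.1 || qa.2.1 == q.1 || qa.2.2.1 == q.2.2.2 || qa.2.2.2 == q.2.2.1)

-- ===== PRECONDITION & SPEC =====

-- Pre_ excludes exactly the empty grids and the grids containing an empty row: there A (and B)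
-- raise an IndexError — except in a handful of degenerate cases where an earlier edge check of
-- the same call already returned True before A reaches the empty row, on which B still raises.
def Pre_check_sides_overlap (grid_a : List String) (grid_b : List String) : Prop :=
  grid_a ≠ [] ∧ grid_b ≠ [] ∧
  (∀ r ∈ grid_a, r.toList ≠ []) ∧ (∀ r ∈ grid_b, r.toList ≠ [])
instance (grid_a : List String) (grid_b : List String) : Decidable (Pre_check_sides_overlap grid_a grid_b) := by
  unfold Pre_check_sides_overlap; infer_instance

def pvWitness_check_sides_overlap : List String × List String :=
  (["#.", ".#"], ["..", "#."])

def Spec_check_sides_overlap (grid_a : List String) (grid_b : List String) (out : Bool) : Prop := out = check_sides_overlap_alt grid_a grid_b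
instance (grid_a : List String) (grid_b : List String) (out : Bool) : Decidable (Spec_check_sides_overlap grid_a grid_b out) := by unfold Spec_check_sides_overlap; infer_instance

-- ===== CLAIM (what is proved, stated in full; the proofs are below) =====
def Claim_equal_check_sides_overlap : Prop := ∀ (grid_a : List String) (grid_b : List String), Dom_check_sides_overlap grid_a grid_b → Pre_check_sides_overlap grid_a grid_b → Spec_check_sides_overlap grid_a grid_b (check_sides_overlap grid_a grid_b)

-- ===== LEMMAS AND PROOFS =====

theorem minrep (n : Nat) (m : Nat) (h : 0 < n) : (List.replicate n m).min? = some m := by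
  induction n with
  | zero => omega
  | succ k ih =>
    cases k with
    | zero => simp [List.replicate]
    | succ j => simp_all [List.replicate_succ, List.min?_cons]

theorem maplen (G : List (List Char)) (m : Nat) (h : ∀ r ∈ G, r.length = m) : G.map List.length = List.replicate G.length m := by
  have := List.eq_replicate_of_mem (l := G.map List.length) (a := m)
    (by intro b hb; simp only [List.mem_map] at hb; obtain ⟨r, hr, rfl⟩ := hb; exact h r hr)
  simpa using this

theorem minsome (G : List (List Char)) (m : Nat) (hne : G ≠ []) (h : ∀ r ∈ G, r.length = m) :
    (G.map List.length).min? = some m := by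
  rw [maplen G m h]; exact minrep _ _ (by simpa using List.length_pos_of_ne_nil hne)

theorem getD_zero_head (r : List Char) (d : Char) : r.getD 0 d = r.headD d := by cases r <;> rfl

theorem getD_last (r : List Char) (m : Nat) (d : Char) (h : r.length = m + 1) :
    r.getD m d = r.getLastD d := by
  have hm : m < r.length := by omega
  rw [List.getD_eq_getElem r d hm]
  rw [List.getLastD_eq_getLast?, List.getLast?_eq_getElem?]
  have hm' : r.length - 1 = m := by omega
  simp [hm', List.getElem?_eq_getElem hm]

theorem range_map_getD (r : List Char) (d : Char) :
    (List.range r.length).map (fun i => r.getD i d) = r := by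
  apply List.ext_getElem (by simp)
  intro i h1 h2
  have h3 : i < (List.range r.length).length := by simpa using h2
  rw [List.getElem_map, List.getElem_range, List.getD_eq_getElem r d h2]

theorem headD_map_range (f : Nat → List Char) (m : Nat) (h : 0 < m) :
    ((List.range m).map f).headD [] = f 0 := by
  cases m with
  | zero => omega
  | succ k => rw [List.range_succ_eq_map]; simp

theorem getLastD_map_range (f : Nat → List Char) (m : Nat) (h : 0 < m) :
    ((List.range m).map f).getLastD [] = f (m - 1) := by
  cases m with
  | zero => omega
  | succ k => rw [List.range_succ]; simp

def pvTL (g : List String) : List (List Char) := g.map String.toList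

def pvRect (G : List (List Char)) (m : Nat) : Prop := G ≠ [] ∧ 0 < m ∧ ∀ r ∈ G, r.length = m

def pvRot (G : List (List Char)) : List (List Char) := pvZipStar G.reverse

def pvTop (G : List (List Char)) : List Char := G.headD []

def pvBot (G : List (List Char)) : List Char := G.getLastD []

def pvLeft (G : List (List Char)) : List Char := G.map (fun r => r.headD ' ')

def pvRight (G : List (List Char)) : List Char := G.map (fun r => r.getLastD ' ')

theorem pvZipStar_rect {G : List (List Char)} {m : Nat} (h : pvRect G m) :
    pvZipStar G = (List.range m).map (fun i => G.map (fun r => r.getD i ' ')) := by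
  obtain ⟨hne, hm, hall⟩ := h
  unfold pvZipStar
  rw [minsome G m hne hall]

theorem pvRect_reverse {G : List (List Char)} {m : Nat} (h : pvRect G m) : pvRect G.reverse m := by
  obtain ⟨hne, hm, hall⟩ := h
  exact ⟨by simpa using hne, hm, by intro r hr; exact hall r (by simpa using hr)⟩

theorem pvRot_eq {G : List (List Char)} {m : Nat} (h : pvRect G m) :
    pvRot G = (List.range m).map (fun i => G.reverse.map (fun r => r.getD i ' ')) := by
  unfold pvRot; rw [pvZipStar_rect (pvRect_reverse h)]

theorem pvRot_rect {G : List (List Char)} {m : Nat} (h : pvRect G m) :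
    pvRect (pvRot G) G.length := by
  rw [pvRot_eq h]
  obtain ⟨hne, hm, hall⟩ := h
  refine ⟨?_, by simpa using List.length_pos_of_ne_nil hne, ?_⟩
  · apply List.ne_nil_of_length_pos
    simpa using hm
  · intro r hr
    simp only [List.mem_map] at hr
    obtain ⟨i, hi, rfl⟩ := hr
    simp

-- minimum row width; meaningful whenever the grid is nonempty
def pvMinW (G : List (List Char)) : Nat := ((G.map List.length).min?).getD 0

theorem min?_rev (l : List Nat) : l.reverse.min? = l.min? := by
  rcases h : l.min? with _ | a
  · rw [List.min?_eq_none_iff] at h; subst h; rfl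
  · rcases h2 : l.reverse.min? with _ | b
    · rw [List.min?_eq_none_iff, List.reverse_eq_nil_iff] at h2
      subst h2; simp at h
    · obtain ⟨hmem, hleast⟩ := List.min?_eq_some_iff.mp h
      obtain ⟨hmem2, hleast2⟩ := List.min?_eq_some_iff.mp h2
      have h3 := hleast b (l.mem_reverse.mp hmem2)
      have h4 := hleast2 a (l.mem_reverse.mpr hmem)
      have heq : a = b := Nat.le_antisymm h3 h4
      rw [heq]

theorem min_facts (G : List (List Char)) (hne : G ≠ []) (hrows : ∀ r ∈ G, r ≠ []) :
    (G.map List.length).min? = some (pvMinW G) ∧ 1 ≤ pvMinW G ∧ ∀ r ∈ G, pvMinW G ≤ r.length := by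
  rcases h : (G.map List.length).min? with _ | v
  · rw [List.min?_eq_none_iff] at h; simp_all
  · obtain ⟨hmem, hleast⟩ := List.min?_eq_some_iff.mp h
    have hW : pvMinW G = v := by simp [pvMinW, h]
    simp only [List.mem_map] at hmem
    obtain ⟨r, hr, rfl⟩ := hmem
    refine ⟨by rw [hW], by rw [hW]; exact List.length_pos_of_ne_nil (hrows r hr), ?_⟩
    intro r' hr'
    rw [hW]
    exact hleast r'.length (List.mem_map_of_mem hr')

-- rotating ANY nonempty grid with nonempty rows yields a rectangular grid (zip truncates)
theorem pvRot_rect' (G : List (List Char)) (hne : G ≠ []) (hrows : ∀ r ∈ G, r ≠ []) :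
    pvRect (pvRot G) G.length := by
  obtain ⟨hmin, hm1, _⟩ := min_facts G hne hrows
  have hminrev : (G.reverse.map List.length).min? = some (pvMinW G) := by
    rw [List.map_reverse, min?_rev]; exact hmin
  unfold pvRot pvZipStar
  rw [hminrev]
  refine ⟨?_, by simpa using List.length_pos_of_ne_nil hne, ?_⟩
  · apply List.ne_nil_of_length_pos
    simpa using hm1
  · intro r hr
    simp only [List.mem_map] at hr
    obtain ⟨i, hi, rfl⟩ := hr
    simp

theorem pvRot_top {G : List (List Char)} {m : Nat} (h : pvRect G m) :
    pvTop (pvRot G) = (pvLeft G).reverse := by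
  obtain ⟨hne, hm, hall⟩ := id h
  rw [pvTop, pvRot_eq h, headD_map_range _ m hm, pvLeft, ← List.map_reverse]
  exact List.map_congr_left (fun r _ => getD_zero_head r ' ')

theorem pvRot_bot {G : List (List Char)} {m : Nat} (h : pvRect G m) :
    pvBot (pvRot G) = (pvRight G).reverse := by
  obtain ⟨hne, hm, hall⟩ := id h
  rw [pvBot, pvRot_eq h, getLastD_map_range _ m hm, pvRight, ← List.map_reverse]
  refine List.map_congr_left (fun r hr => ?_)
  exact getD_last r (m - 1) ' ' (by rw [hall r (by simpa using hr)]; omega)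

theorem pvRot_left {G : List (List Char)} {m : Nat} (h : pvRect G m) :
    pvLeft (pvRot G) = pvBot G := by
  obtain ⟨hne, hm, hall⟩ := id h
  rw [pvLeft, pvRot_eq h, List.map_map]
  have hlast : G.getLast? = some (G.getLast hne) := List.getLast?_eq_some_getLast hne
  have step : ∀ i : Nat, ((G.reverse.map (fun r => r.getD i ' ')).headD ' ') = (G.getLast hne).getD i ' ' := by
    intro i
    rw [List.headD_eq_head?_getD, List.head?_map, List.head?_reverse, hlast]
    rfl
  have hlen : (G.getLast hne).length = m := hall _ (List.getLast_mem hne)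
  calc (List.range m).map ((fun r => r.headD ' ') ∘ fun i => G.reverse.map (fun r => r.getD i ' '))
      = (List.range m).map (fun i => (G.getLast hne).getD i ' ') := List.map_congr_left (fun i _ => step i)
    _ = G.getLast hne := by rw [← hlen]; exact range_map_getD _ _
    _ = pvBot G := by rw [pvBot, List.getLastD_eq_getLast?, hlast]; rfl

theorem pvRot_right {G : List (List Char)} {m : Nat} (h : pvRect G m) :
    pvRight (pvRot G) = pvTop G := by
  obtain ⟨hne, hm, hall⟩ := id h
  rw [pvRight, pvRot_eq h, List.map_map]
  have hhead : G.head? = some (G.head hne) := List.head?_eq_some_head hne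
  have step : ∀ i : Nat, ((G.reverse.map (fun r => r.getD i ' ')).getLastD ' ') = (G.head hne).getD i ' ' := by
    intro i
    rw [List.getLastD_eq_getLast?, List.getLast?_map, List.getLast?_reverse, hhead]
    rfl
  have hlen : (G.head hne).length = m := hall _ (List.head_mem hne)
  calc (List.range m).map ((fun r => r.getLastD ' ') ∘ fun i => G.reverse.map (fun r => r.getD i ' '))
      = (List.range m).map (fun i => (G.head hne).getD i ' ') := List.map_congr_left (fun i _ => step i)
    _ = G.head hne := by rw [← hlen]; exact range_map_getD _ _
    _ = pvTop G := by rw [pvTop, List.headD_eq_head?_getD, hhead]; rfl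

theorem map_toList_ofList (x : List (List Char)) : x.map (String.toList ∘ String.ofList) = x := by
  simp [Function.comp_def]

theorem pvTL_rot (g : List String) : pvTL (pvRotateGrid g) = pvRot (pvTL g) := by
  simp [pvRotateGrid, pvTL, List.map_map, map_toList_ofList, pvRot]

theorem pvTop_TL (g : List String) (h : g ≠ []) : pvTop (pvTL g) = (g.head h).toList := by
  rw [pvTop, pvTL, List.headD_eq_head?_getD, List.head?_map, List.head?_eq_some_head h]; rfl

theorem pvBot_TL (g : List String) (h : g ≠ []) : pvBot (pvTL g) = (g.getLast h).toList := by
  rw [pvBot, pvTL, List.getLastD_eq_getLast?, List.getLast?_map, List.getLast?_eq_some_getLast h]; rfl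

theorem some_head_of_ne (l : List Char) (h : l ≠ []) : l[0]? = some (l.headD ' ') := by
  cases l with | nil => simp_all | cons a t => rfl

theorem some_last_of_ne (l : List Char) (h : l ≠ []) : l.getLast? = some (l.getLastD ' ') := by
  rw [List.getLast?_eq_some_getLast h, List.getLastD_eq_getLast?, List.getLast?_eq_some_getLast h]; rfl

theorem map_some_col0 (g : List String) (h : ∀ r ∈ g, r.toList ≠ []) :
    g.map (fun row => PySem.Str.pyGet? row 0) = (pvLeft (pvTL g)).map some := by
  rw [pvLeft, pvTL, List.map_map, List.map_map]
  refine List.map_congr_left (fun r hr => ?_)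
  have := h r hr
  simp only [Function.comp]
  simp only [PySem.Str.pyGet?_eq, PySem.Chars.pyGet?_eq_listPyGet?, PySem.List.pyGet?_zero]
  exact some_head_of_ne _ this

theorem map_some_colL (g : List String) (h : ∀ r ∈ g, r.toList ≠ []) :
    g.map (fun row => PySem.Str.pyGet? row (-1)) = (pvRight (pvTL g)).map some := by
  rw [pvRight, pvTL, List.map_map, List.map_map]
  refine List.map_congr_left (fun r hr => ?_)
  have := h r hr
  simp only [Function.comp]
  simp only [PySem.Str.pyGet?_eq, PySem.Chars.pyGet?_eq_listPyGet?, PySem.List.pyGet?_neg_one]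
  exact some_last_of_ne _ this

theorem pvJoin?_map_some (l : List Char) : pvJoin? (l.map some) = some l := by
  induction l with
  | nil => rfl
  | cons c t ih => simp [pvJoin?, ih]

theorem str_ne {g : List String} (h : pvTL g ≠ []) : g ≠ [] := by
  simp only [pvTL, ne_eq, List.map_eq_nil_iff] at h; exact h

theorem str_rows {g : List String} (h : ∀ r ∈ pvTL g, r ≠ []) : ∀ r ∈ g, r.toList ≠ [] := by
  intro r hr
  exact h r.toList (by simp only [pvTL, List.mem_map]; exact ⟨r, hr, rfl⟩)

theorem rect_rows {G : List (List Char)} {m : Nat} (h : pvRect G m) : ∀ r ∈ G, r ≠ [] :=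
  fun r hr => List.ne_nil_of_length_pos (by rw [h.2.2 r hr]; exact h.2.1)

theorem tl_ne {g : List String} (h : g ≠ []) : pvTL g ≠ [] := by
  simpa [pvTL] using h

theorem tl_rows {g : List String} (h : ∀ r ∈ g, r.toList ≠ []) : ∀ r ∈ pvTL g, r ≠ [] := by
  intro r hr
  simp only [pvTL, List.mem_map] at hr
  obtain ⟨s, hs, rfl⟩ := hr
  exact h s hs

-- the four components of pvEdgesQ are all `some …` under Pre_
theorem port_top (g : List String) (h : g ≠ []) :
    (PySem.List.pyGet? g 0).map String.toList = some (pvTop (pvTL g)) := by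
  rw [PySem.List.pyGet?_zero, ← List.head?_eq_getElem?, List.head?_eq_some_head h, pvTop_TL g h]
  rfl

theorem port_bot (g : List String) (h : g ≠ []) :
    (PySem.List.pyGet? g (-1)).map String.toList = some (pvBot (pvTL g)) := by
  rw [PySem.List.pyGet?_neg_one, List.getLast?_eq_some_getLast h, pvBot_TL g h]
  rfl

theorem port_col0 (g : List String) (h : ∀ r ∈ g, r.toList ≠ []) :
    pvJoin? (g.map (fun r => PySem.Str.pyGet? r 0)) = some (pvLeft (pvTL g)) := by
  rw [map_some_col0 g h, pvJoin?_map_some]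

theorem port_colLast (g : List String) (h : ∀ r ∈ g, r.toList ≠ []) :
    pvJoin? (g.map (fun r => PySem.Str.pyGet? r (-1))) = some (pvRight (pvTL g)) := by
  rw [map_some_colL g h, pvJoin?_map_some]

theorem edgesQ_eq (g : List String) (hne : g ≠ []) (hrows : ∀ r ∈ g, r.toList ≠ []) :
    pvEdgesQ g = (some (pvTop (pvTL g)), some (pvBot (pvTL g)),
                  some (pvLeft (pvTL g)), some (pvRight (pvTL g))) := by
  unfold pvEdgesQ
  rw [port_top g hne, port_bot g hne, port_col0 g hrows, port_colLast g hrows]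

-- KEY: on a rectangular grid, edges of the real rotation = quadruple rotation of the edges
theorem qrot {g : List String} {m : Nat} (hrect : pvRect (pvTL g) m) :
    pvEdgesQ (pvRotateGrid g) = pvRotQ (pvEdgesQ g) := by
  have hne : g ≠ [] := str_ne hrect.1
  have hrows : ∀ r ∈ g, r.toList ≠ [] := str_rows (rect_rows hrect)
  have hrectR : pvRect (pvTL (pvRotateGrid g)) (pvTL g).length := by
    rw [pvTL_rot]; exact pvRot_rect hrect
  have hneR : pvRotateGrid g ≠ [] := str_ne hrectR.1
  have hrowsR : ∀ r ∈ pvRotateGrid g, r.toList ≠ [] := str_rows (rect_rows hrectR)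
  rw [edgesQ_eq _ hneR hrowsR, edgesQ_eq _ hne hrows, pvTL_rot,
    pvRot_top hrect, pvRot_bot hrect, pvRot_left hrect, pvRot_right hrect]
  rfl

-- a ragged nonempty grid with nonempty rows still rotates to a rectangular one
theorem rot_rect_of_rows (g : List String) (hne : g ≠ []) (hrows : ∀ r ∈ g, r.toList ≠ []) :
    pvRect (pvTL (pvRotateGrid g)) (pvTL g).length := by
  rw [pvTL_rot]
  exact pvRot_rect' (pvTL g) (tl_ne hne) (tl_rows hrows)

-- Bool-level bridges from A's raw comparisons to the pvEdgesQ components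
theorem beq_map_toList (x y : Option String) :
    (x == y) = (x.map String.toList == y.map String.toList) := by
  cases x <;> cases y <;> simp [String.toList_inj]

theorem beq_map_some (l l' : List Char) : (l.map some == l'.map some) = (l == l') := by
  rw [Bool.eq_iff_iff]
  simp only [beq_iff_eq]
  exact ⟨fun h => List.map_injective_iff.2 (fun _ _ h' => Option.some.inj h') h, fun h => by rw [h]⟩

theorem cmp_col_lr (a h : List String)
    (hra : ∀ r ∈ a, r.toList ≠ []) (hrh : ∀ r ∈ h, r.toList ≠ []) :
    (a.map (fun row => PySem.Str.pyGet? row 0) == h.map (fun row => PySem.Str.pyGet? row (-1)))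
      = (pvJoin? (a.map (fun row => PySem.Str.pyGet? row 0))
          == pvJoin? (h.map (fun row => PySem.Str.pyGet? row (-1)))) := by
  rw [port_col0 a hra, port_colLast h hrh, map_some_col0 a hra, map_some_colL h hrh,
    beq_map_some]
  simp

theorem cmp_col_rl (a h : List String)
    (hra : ∀ r ∈ a, r.toList ≠ []) (hrh : ∀ r ∈ h, r.toList ≠ []) :
    (a.map (fun row => PySem.Str.pyGet? row (-1)) == h.map (fun row => PySem.Str.pyGet? row 0))
      = (pvJoin? (a.map (fun row => PySem.Str.pyGet? row (-1)))
          == pvJoin? (h.map (fun row => PySem.Str.pyGet? row 0))) := by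
  rw [port_colLast a hra, port_col0 h hrh, map_some_colL a hra, map_some_col0 h hrh,
    beq_map_some]
  simp

-- A's per-orientation disjunct, written with the pvEdgesQ components
theorem disjunct_eq (a h : List String)
    (hra : ∀ r ∈ a, r.toList ≠ []) (hrh : ∀ r ∈ h, r.toList ≠ []) :
    (PySem.List.pyGet? a 0 == PySem.List.pyGet? h (-1) ||
     PySem.List.pyGet? a (-1) == PySem.List.pyGet? h 0 ||
     a.map (fun row => PySem.Str.pyGet? row 0) == h.map (fun row => PySem.Str.pyGet? row (-1)) ||
     a.map (fun row => PySem.Str.pyGet? row (-1)) == h.map (fun row => PySem.Str.pyGet? row 0))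
    = ((pvEdgesQ a).1 == (pvEdgesQ h).2.1 || (pvEdgesQ a).2.1 == (pvEdgesQ h).1 ||
       (pvEdgesQ a).2.2.1 == (pvEdgesQ h).2.2.2 || (pvEdgesQ a).2.2.2 == (pvEdgesQ h).2.2.1) := by
  unfold pvEdgesQ
  rw [← beq_map_toList (PySem.List.pyGet? a 0), ← beq_map_toList (PySem.List.pyGet? a (-1)),
    cmp_col_lr a h hra hrh, cmp_col_rl a h hra hrh]

-- evaluated offsets of rotate_grid_clockwise
theorem off0 (g : List String) : rotate_grid_clockwise g 0 = g := by
  simp [rotate_grid_clockwise]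

theorem off1 (g : List String) : rotate_grid_clockwise g 1 = pvRotateGrid g := by
  simp [rotate_grid_clockwise, pvRotateGrid, List.range_succ]

theorem off2 (g : List String) : rotate_grid_clockwise g 2 = pvRotateGrid (pvRotateGrid g) := by
  simp [rotate_grid_clockwise, pvRotateGrid, List.range_succ]

theorem off3 (g : List String) :
    rotate_grid_clockwise g 3 = pvRotateGrid (pvRotateGrid (pvRotateGrid g)) := by
  simp [rotate_grid_clockwise, pvRotateGrid, List.range_succ]

theorem off10 (g : List String) :
    rotate_grid_clockwise g 10 = g.map (fun row => String.ofList row.toList.reverse) := by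
  simp [rotate_grid_clockwise]

theorem off11 (g : List String) :
    rotate_grid_clockwise g 11 = pvRotateGrid (g.map (fun row => String.ofList row.toList.reverse)) := by
  simp [rotate_grid_clockwise, pvRotateGrid, List.range_succ]

theorem off12 (g : List String) :
    rotate_grid_clockwise g 12
      = pvRotateGrid (pvRotateGrid (g.map (fun row => String.ofList row.toList.reverse))) := by
  simp [rotate_grid_clockwise, pvRotateGrid, List.range_succ]

theorem off13 (g : List String) :
    rotate_grid_clockwise g 13
      = pvRotateGrid (pvRotateGrid (pvRotateGrid (g.map (fun row => String.ofList row.toList.reverse)))) := by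
  simp [rotate_grid_clockwise, pvRotateGrid, List.range_succ]

set_option maxHeartbeats 2000000 in
theorem main_eq (grid_a grid_b : List String)
    (_h1 : grid_a ≠ []) (h2 : grid_b ≠ [])
    (h3 : ∀ r ∈ grid_a, r.toList ≠ []) (h4 : ∀ r ∈ grid_b, r.toList ≠ []) :
    check_sides_overlap grid_a grid_b = check_sides_overlap_alt grid_a grid_b := by
  -- the flipped grid and nonemptiness facts
  set f := grid_b.map (fun row => String.ofList row.toList.reverse) with hf
  have hfne : f ≠ [] := by simpa [hf] using h2
  have hfrows : ∀ r ∈ f, r.toList ≠ [] := by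
    intro r hr
    simp only [hf, List.mem_map] at hr
    obtain ⟨s, hs, rfl⟩ := hr
    simpa using h4 s hs
  -- rectangularity after one real rotation, on both mirror sides
  have rectR := rot_rect_of_rows grid_b h2 h4
  have rectR1 : pvRect (pvTL (pvRotateGrid (pvRotateGrid grid_b))) (pvTL (pvRotateGrid grid_b)).length := by
    rw [pvTL_rot]; exact pvRot_rect rectR
  have rectF := rot_rect_of_rows f hfne hfrows
  have rectF1 : pvRect (pvTL (pvRotateGrid (pvRotateGrid f))) (pvTL (pvRotateGrid f)).length := by
    rw [pvTL_rot]; exact pvRot_rect rectF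
  have rowsR := str_rows (rect_rows rectR)
  have rowsR1 := str_rows (rect_rows rectR1)
  have rowsR2 := str_rows (rect_rows (by rw [pvTL_rot]; exact pvRot_rect rectR1))
  have rowsF := str_rows (rect_rows rectF)
  have rowsF1 := str_rows (rect_rows rectF1)
  have rowsF2 := str_rows (rect_rows (by rw [pvTL_rot]; exact pvRot_rect rectF1))
  rw [check_sides_overlap, check_sides_overlap_alt]
  simp only [List.any_cons, List.any_nil, Bool.or_false,
    List.foldl_cons, List.foldl_nil, List.range_succ, List.range_zero,
    List.foldl_append, List.nil_append, List.append_assoc, List.singleton_append,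
    List.any_append]
  rw [off0, off1, off2, off3, off10, off11, off12, off13, ← hf]
  rw [disjunct_eq grid_a grid_b h3 h4,
    disjunct_eq grid_a (pvRotateGrid grid_b) h3 rowsR,
    disjunct_eq grid_a (pvRotateGrid (pvRotateGrid grid_b)) h3 rowsR1,
    disjunct_eq grid_a (pvRotateGrid (pvRotateGrid (pvRotateGrid grid_b))) h3 rowsR2,
    disjunct_eq grid_a f h3 hfrows,
    disjunct_eq grid_a (pvRotateGrid f) h3 rowsF,
    disjunct_eq grid_a (pvRotateGrid (pvRotateGrid f)) h3 rowsF1,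
    disjunct_eq grid_a (pvRotateGrid (pvRotateGrid (pvRotateGrid f))) h3 rowsF2]
  rw [qrot rectR1, qrot rectF1, qrot rectR, qrot rectF]
  simp only [Bool.or_assoc]

-- ===== VERDICT (by name: the statement is the Claim_ definition above) =====
theorem check_sides_overlap_spec : Claim_equal_check_sides_overlap := by
  intro grid_a grid_b hdom hpre
  obtain ⟨h1, h2, h3, h4⟩ := hpre
  unfold Spec_check_sides_overlap
  exact main_eq grid_a grid_b h1 h2 h3 h4
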